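-- pv_equiv track=rewrite | github.com/banyuechenjiang/Termux-Python-Toys | 幻想乡年历.py | get_time_as_traditional_chinese_hour
-- ===== SOURCE A (Python) =====
-- def get_time_as_traditional_chinese_hour(hour, minute):
--     chinese_hours = {
--         23: "子", 1: "丑", 3: "寅", 5: "卯", 7: "辰", 9: "巳",
--         11: "午", 13: "未", 15: "申", 17: "酉", 19: "戌", 21: "亥"
--     }
--
--     shichen_hour = hour % 24
--     current_shichen_name = ""
--     for start_hour, shichen_name in chinese_hours.items():
--         if (start_hour <= shichen_hour < start_hour + 2) or (start_hour == 23 and shichen_hour < 1):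
--             current_shichen_name = shichen_name
--             break
--
--     minute_in_shichen = minute % 120
--
--     quarter_index = minute_in_shichen // 15
--     if minute_in_shichen < 60:
--         shi_segment = "初"
--     else:
--         shi_segment = "正"
--         quarter_index -= 4
--
--     quarter_numbers = ["一", "二", "三", "四"]
--     quarter_number_name = quarter_numbers[quarter_index]
--
--     return f"{current_shichen_name}時{shi_segment}{quarter_number_name}刻"
-- ===== SOURCE B (Python) =====
-- def get_time_as_traditional_chinese_hour(hour, minute):
--     names = ["子", "丑", "寅", "卯", "辰", "巳", "午", "未", "申", "酉", "戌", "亥"]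
--     quarters = ["一", "二", "三", "四"]
--     name = names[((hour % 24 + 1) % 24) // 2]
--     m = minute % 120
--     if m < 60:
--         seg, q = "初", m // 15
--     else:
--         seg, q = "正", m // 15 - 4
--     return f"{name}時{seg}{quarters[q]}刻"
-- ===== Notes on version B (the rewrite author's own statement) =====
-- stated objective: simpler
-- what changed: Replaces the dict-search loop with sentinel and break by a direct closed-form index ((hour%24+1)%24)//2 into an ordered name list, removing the linear search entirely.
import Mathlib
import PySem

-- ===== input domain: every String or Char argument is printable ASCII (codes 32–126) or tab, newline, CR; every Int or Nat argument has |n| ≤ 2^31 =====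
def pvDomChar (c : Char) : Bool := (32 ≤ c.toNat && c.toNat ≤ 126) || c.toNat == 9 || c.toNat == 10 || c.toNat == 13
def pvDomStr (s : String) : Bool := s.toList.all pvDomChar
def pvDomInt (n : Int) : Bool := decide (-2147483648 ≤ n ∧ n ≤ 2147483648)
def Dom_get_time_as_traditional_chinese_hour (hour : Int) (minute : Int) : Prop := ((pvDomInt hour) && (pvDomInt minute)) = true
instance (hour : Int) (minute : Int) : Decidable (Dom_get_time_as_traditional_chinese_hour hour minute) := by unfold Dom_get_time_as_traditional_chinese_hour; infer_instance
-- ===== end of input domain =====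

-- B replaces A's linear search over the dict (with sentinel "" and break) by a
-- closed-form index into an ordered name list; objective: simpler.

-- ===== PORT A =====
-- A's for-loop with break over chinese_hours.items(): returns the first
-- matching shichen name, or the sentinel "" if none matches.
def pvSearchA : List (Int × String) → Int → String
  | [], _ => ""
  | (start_hour, shichen_name) :: rest, shichen_hour =>
    if (start_hour ≤ shichen_hour ∧ shichen_hour < start_hour + 2) ∨
       (start_hour = 23 ∧ shichen_hour < 1) then shichen_name
    else pvSearchA rest shichen_hour

def get_time_as_traditional_chinese_hour (hour : Int) (minute : Int) : String :=
  let chinese_hours : List (Int × String) :=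
    [(23, "子"), (1, "丑"), (3, "寅"), (5, "卯"), (7, "辰"), (9, "巳"),
     (11, "午"), (13, "未"), (15, "申"), (17, "酉"), (19, "戌"), (21, "亥")]
  let shichen_hour := PySem.Int.mod hour 24
  let current_shichen_name := pvSearchA chinese_hours shichen_hour
  let minute_in_shichen := PySem.Int.mod minute 120
  let quarter_index := PySem.Int.floordiv minute_in_shichen 15
  let (shi_segment, quarter_index) :=
    if minute_in_shichen < 60 then ("初", quarter_index) else ("正", quarter_index - 4)
  let quarter_numbers := ["一", "二", "三", "四"]
  -- quarter_index is always in [0,3], so the IndexError branch is unreachable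
  let quarter_number_name := (PySem.List.pyGet? quarter_numbers quarter_index).getD ""
  current_shichen_name ++ "時" ++ shi_segment ++ quarter_number_name ++ "刻"

-- ===== PORT B =====
def get_time_as_traditional_chinese_hour_alt (hour : Int) (minute : Int) : String :=
  let names := ["子", "丑", "寅", "卯", "辰", "巳", "午", "未", "申", "酉", "戌", "亥"]
  let quarters := ["一", "二", "三", "四"]
  let name := (PySem.List.pyGet? names
    (PySem.Int.floordiv (PySem.Int.mod (PySem.Int.mod hour 24 + 1) 24) 2)).getD ""
  let m := PySem.Int.mod minute 120
  let (seg, q) :=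
    if m < 60 then ("初", PySem.Int.floordiv m 15) else ("正", PySem.Int.floordiv m 15 - 4)
  name ++ "時" ++ seg ++ (PySem.List.pyGet? quarters q).getD "" ++ "刻"

-- ===== PRECONDITION & SPEC =====
def Spec_get_time_as_traditional_chinese_hour (hour : Int) (minute : Int) (out : String) : Prop := out = get_time_as_traditional_chinese_hour_alt hour minute
instance (hour : Int) (minute : Int) (out : String) : Decidable (Spec_get_time_as_traditional_chinese_hour hour minute out) := by unfold Spec_get_time_as_traditional_chinese_hour; infer_instance

-- ===== CLAIM (what is proved, stated in full; the proofs are below) =====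
def Claim_equal_get_time_as_traditional_chinese_hour : Prop := ∀ (hour : Int) (minute : Int), Dom_get_time_as_traditional_chinese_hour hour minute → Spec_get_time_as_traditional_chinese_hour hour minute (get_time_as_traditional_chinese_hour hour minute)

-- ===== LEMMAS AND PROOFS =====

lemma pv_mod_mod (a n : Int) (hn : 0 < n) :
    PySem.Int.mod (PySem.Int.mod a n) n = PySem.Int.mod a n := by
  rw [PySem.Int.mod_eq_emod_of_pos hn, PySem.Int.mod_eq_emod_of_pos hn,
      Int.emod_emod_of_dvd _ dvd_rfl]

lemma pv_A_mod (hour minute : Int) :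
    get_time_as_traditional_chinese_hour hour minute =
    get_time_as_traditional_chinese_hour (PySem.Int.mod hour 24) (PySem.Int.mod minute 120) := by
  simp only [get_time_as_traditional_chinese_hour,
    pv_mod_mod _ 24 (by norm_num), pv_mod_mod _ 120 (by norm_num)]

lemma pv_B_mod (hour minute : Int) :
    get_time_as_traditional_chinese_hour_alt hour minute =
    get_time_as_traditional_chinese_hour_alt (PySem.Int.mod hour 24) (PySem.Int.mod minute 120) := by
  simp only [get_time_as_traditional_chinese_hour_alt,
    pv_mod_mod _ 24 (by norm_num), pv_mod_mod _ 120 (by norm_num)]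

set_option maxRecDepth 4000 in
set_option maxHeartbeats 2000000 in
lemma pv_fin : ∀ h ∈ Finset.Icc (0 : Int) 23, ∀ m ∈ Finset.Icc (0 : Int) 119,
    get_time_as_traditional_chinese_hour h m = get_time_as_traditional_chinese_hour_alt h m := by
  decide

-- ===== VERDICT (by name: the statement is the Claim_ definition above) =====
theorem get_time_as_traditional_chinese_hour_spec : Claim_equal_get_time_as_traditional_chinese_hour := by
  intro hour minute _
  unfold Spec_get_time_as_traditional_chinese_hour
  rw [pv_A_mod, pv_B_mod]
  have h24 : PySem.Int.mod hour 24 = hour % 24 := PySem.Int.mod_eq_emod_of_pos (by norm_num)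
  have h120 : PySem.Int.mod minute 120 = minute % 120 := PySem.Int.mod_eq_emod_of_pos (by norm_num)
  apply pv_fin
  · rw [h24]; simp [Finset.mem_Icc]
    constructor
    · exact Int.emod_nonneg _ (by norm_num)
    · have := Int.emod_lt_of_pos hour (show (0:Int) < 24 by norm_num); omega
  · rw [h120]; simp [Finset.mem_Icc]
    constructor
    · exact Int.emod_nonneg _ (by norm_num)
    · have := Int.emod_lt_of_pos minute (show (0:Int) < 120 by norm_num); omega
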